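-- pv_equiv track=rewrite | github.com/korolaab/Lego-NET | load_photo.py | name_process
-- ===== SOURCE A (Python) =====
-- def name_process(file_name):
--     num = 0
--     name = ''
--     for i in file_name:
--         if(i == '_'):
--             num = num + 1
--
--     for i in file_name:
--         if( i == '_'):
--             num = num - 1
--         if(num == 0):
--             break
--         name = name + i
--     return name
-- ===== SOURCE B (Python) =====
-- def name_process(file_name):
--     # single right-to-left scan for the last underscore, then one slice
--     for idx in range(len(file_name) - 1, -1, -1):
--         if file_name[idx] == '_':
--             return file_name[:idx]
--     return ''
-- ===== Notes on version B (the rewrite author's own statement) =====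
-- stated objective: idiomatic
-- what changed: replaces A's count-all-underscores pass plus character-by-character rebuild loop with a single right-to-left scan locating the last underscore followed by one slice
import Mathlib
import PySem

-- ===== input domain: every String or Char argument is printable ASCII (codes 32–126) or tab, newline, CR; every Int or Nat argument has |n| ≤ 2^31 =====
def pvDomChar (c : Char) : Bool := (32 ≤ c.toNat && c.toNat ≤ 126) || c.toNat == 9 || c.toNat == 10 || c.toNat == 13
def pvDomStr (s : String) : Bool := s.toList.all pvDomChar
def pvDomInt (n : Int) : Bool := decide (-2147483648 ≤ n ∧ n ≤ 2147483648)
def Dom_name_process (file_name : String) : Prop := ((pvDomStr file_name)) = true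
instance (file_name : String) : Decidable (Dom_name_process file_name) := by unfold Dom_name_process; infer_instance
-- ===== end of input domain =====

-- B replaces A's count-underscores pass plus character-by-character rebuild with one
-- right-to-left scan for the last underscore and a single slice.

-- ===== PORT A =====
-- first loop of A: count the underscores
def pvCountA (cs : List Char) : Int :=
  cs.foldl (fun num i => if i = '_' then num + 1 else num) 0

-- second loop of A: decrement on '_', break when num hits 0, otherwise append
def pvLoopA : List Char → Int → List Char → List Char
  | [], _, name => name
  | i :: rest, num, name =>
      let num' := if i = '_' then num - 1 else num
      if num' = 0 then name else pvLoopA rest num' (name ++ [i])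

def name_process (file_name : String) : String :=
  String.ofList (pvLoopA file_name.toList (pvCountA file_name.toList) [])

-- ===== PORT B =====
-- B's downward loop: scan indices n-1, n-2, …, 0, return the first index holding '_'
def pvScanB (cs : List Char) : Nat → Option Nat
  | 0 => none
  | n + 1 => if cs.getD n ' ' = '_' then some n else pvScanB cs n

def name_process_alt (file_name : String) : String :=
  match pvScanB file_name.toList file_name.toList.length with
  | some idx => String.ofList (file_name.toList.take idx)
  | none => ""

-- ===== PRECONDITION & SPEC =====
def Spec_name_process (file_name : String) (out : String) : Prop := out = name_process_alt file_name
instance (file_name : String) (out : String) : Decidable (Spec_name_process file_name out) := by unfold Spec_name_process; infer_instance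

-- ===== CLAIM (what is proved, stated in full; the proofs are below) =====
def Claim_equal_name_process : Prop := ∀ (file_name : String), Dom_name_process file_name → Spec_name_process file_name (name_process file_name)

-- ===== LEMMAS AND PROOFS =====

theorem pvCountA_go (cs : List Char) (n : Int) :
    cs.foldl (fun num i => if i = '_' then num + 1 else num) n
      = n + (cs.countP (· = '_') : Int) := by
  induction cs generalizing n with
  | nil => simp
  | cons c rest ih =>
      simp only [List.foldl_cons, List.countP_cons, ih]
      by_cases h : c = '_' <;> simp [h, Int.add_comm, Int.add_assoc]

theorem pvCountA_eq (cs : List Char) : pvCountA cs = (cs.countP (· = '_') : Int) := by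
  simpa using pvCountA_go cs 0

-- shifting the downward scan past a cons
theorem pvScanB_cons (c : Char) (rest : List Char) (n : Nat) :
    pvScanB (c :: rest) (n + 1)
      = match pvScanB rest n with
        | some j => some (j + 1)
        | none => if c = '_' then some 0 else none := by
  induction n with
  | zero => simp [pvScanB]
  | succ n ih =>
      show (if (c :: rest).getD (n + 1) ' ' = '_' then some (n + 1)
            else pvScanB (c :: rest) (n + 1)) = _
      rw [List.getD_cons_succ, ih]
      by_cases h : rest.getD n ' ' = '_'
      · rw [if_pos h]
        rw [show pvScanB rest (n + 1) = if rest.getD n ' ' = '_' then some n else pvScanB rest n from rfl]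
        rw [if_pos h]
      · rw [if_neg h]
        rw [show pvScanB rest (n + 1) = if rest.getD n ' ' = '_' then some n else pvScanB rest n from rfl]
        rw [if_neg h]

theorem pvScanB_none_iff (cs : List Char) :
    pvScanB cs cs.length = none ↔ cs.countP (· = '_') = 0 := by
  induction cs with
  | nil => simp [pvScanB]
  | cons c rest ih =>
      rw [List.length_cons, pvScanB_cons, List.countP_cons]
      cases h : pvScanB rest rest.length with
      | some j =>
          have hr : rest.countP (· = '_') ≠ 0 := fun h0 => by
            rw [ih.mpr h0] at h; cases h
          by_cases hc : c = '_'
          · simp [hc]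
          · simp [hc]
            obtain ⟨a, ha, hp⟩ := List.countP_pos_iff.mp (Nat.pos_of_ne_zero hr)
            simp at hp
            exact hp ▸ ha
      | none =>
          have hr0 : rest.countP (· = '_') = 0 := ih.mp h
          by_cases hc : c = '_' <;> simp [hc, hr0]

-- main invariant: when A's counter equals the number of underscores left (≥ 1),
-- the second loop appends exactly the prefix before the last underscore
theorem pvLoopA_char (cs : List Char) :
    ∀ acc, 1 ≤ cs.countP (· = '_') →
      pvLoopA cs (cs.countP (· = '_') : Int) acc
        = acc ++ cs.take ((pvScanB cs cs.length).getD 0) := by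
  induction cs with
  | nil => intro acc h; simp at h
  | cons c rest ih =>
      intro acc h
      rw [List.length_cons, pvScanB_cons]
      simp only [pvLoopA]
      by_cases hc : c = '_'
      · rw [if_pos hc]
        have hcnt : ((c :: rest).countP (· = '_') : Int) - 1 = (rest.countP (· = '_') : Int) := by
          rw [List.countP_cons]; simp [hc]
        rw [hcnt]
        by_cases hr : rest.countP (· = '_') = 0
        · have hnone : pvScanB rest rest.length = none := (pvScanB_none_iff rest).mpr hr
          simp [hr, hnone, hc]
        · have hsome : ∃ j, pvScanB rest rest.length = some j := by
            cases hx : pvScanB rest rest.length with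
            | none => exact absurd ((pvScanB_none_iff rest).mp hx) hr
            | some j => exact ⟨j, rfl⟩
          obtain ⟨j, hj⟩ := hsome
          have h1 : 1 ≤ rest.countP (· = '_') := Nat.one_le_iff_ne_zero.mpr hr
          have hne : (rest.countP (· = '_') : Int) ≠ 0 := by
            exact_mod_cast hr
          rw [if_neg hne, ih (acc ++ [c]) h1, hj]
          simp
      · rw [if_neg hc]
        have hcnt : ((c :: rest).countP (· = '_')) = rest.countP (· = '_') := by
          rw [List.countP_cons]; simp [hc]
        have h1 : 1 ≤ rest.countP (· = '_') := hcnt ▸ h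
        have hsome : ∃ j, pvScanB rest rest.length = some j := by
          cases hx : pvScanB rest rest.length with
          | none =>
              exact absurd ((pvScanB_none_iff rest).mp hx) (Nat.one_le_iff_ne_zero.mp h1)
          | some j => exact ⟨j, rfl⟩
        obtain ⟨j, hj⟩ := hsome
        have hne : ((c :: rest).countP (· = '_') : Int) ≠ 0 := by
          exact_mod_cast Nat.one_le_iff_ne_zero.mp (hcnt ▸ h1)
        rw [if_neg hne, hcnt, ih (acc ++ [c]) h1, hj]
        simp

-- when there is no underscore, A's loop stops at once (or on the empty string)
theorem pvLoopA_zero (cs : List Char) (h : cs.countP (· = '_') = 0) :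
    pvLoopA cs 0 [] = [] := by
  cases cs with
  | nil => rfl
  | cons c rest =>
      have hc : c ≠ '_' := by
        intro hc; rw [List.countP_cons] at h; simp [hc] at h
      simp only [pvLoopA]
      rw [if_neg hc]
      simp

-- ===== VERDICT (by name: the statement is the Claim_ definition above) =====
theorem name_process_spec : Claim_equal_name_process := by
  intro s _
  show name_process s = name_process_alt s
  unfold name_process name_process_alt
  rw [pvCountA_eq]
  by_cases h : s.toList.countP (· = '_') = 0
  · rw [(pvScanB_none_iff s.toList).mpr h]
    rw [show (s.toList.countP (· = '_') : Int) = 0 from by exact_mod_cast h]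
    rw [pvLoopA_zero s.toList h]
  · have h1 : 1 ≤ s.toList.countP (· = '_') := Nat.one_le_iff_ne_zero.mpr h
    have hsome : ∃ j, pvScanB s.toList s.toList.length = some j := by
      cases hx : pvScanB s.toList s.toList.length with
      | none => exact absurd ((pvScanB_none_iff s.toList).mp hx) h
      | some j => exact ⟨j, rfl⟩
    obtain ⟨j, hj⟩ := hsome
    rw [pvLoopA_char s.toList [] h1, hj]
    simp
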